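-- pv_equiv track=rewrite | github.com/jhkim07/Test-Aware_Debugging_Loop | bench_agent/protocol/diff_cleaner.py | remove_conftest_from_diff
-- ===== SOURCE A (Python) =====
-- def remove_conftest_from_diff(text: str) -> str:
--     """
--     Remove all conftest.py related sections from the diff.
--     This prevents patch application failures due to conftest.py conflicts.
--     """
--     if not text:
--         return text
--
--     lines = text.split('\n')
--     filtered_lines = []
--     skip_conftest_section = False
--
--     i = 0
--     while i < len(lines):
--         line = lines[i]
--
--         # Check if this line starts a conftest.py diff section
--         if line.startswith('diff --git') and 'conftest.py' in line:
--             skip_conftest_section = True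
--             i += 1
--             continue
--
--         # If we're in a conftest.py section, skip until next diff section
--         if skip_conftest_section:
--             if line.startswith('diff --git'):
--                 skip_conftest_section = False
--                 # Don't skip this line, process it
--             else:
--                 i += 1
--                 continue
--
--         # Check for conftest.py in file paths
--         if line.startswith('---') and 'conftest.py' in line:
--             skip_conftest_section = True
--             i += 1
--             continue
--
--         if line.startswith('+++') and 'conftest.py' in line:
--             skip_conftest_section = True
--             i += 1
--             continue
--
--         # Add line if not in conftest.py section
--         if not skip_conftest_section:
--             filtered_lines.append(line)
--
--         i += 1
--
--     return '\n'.join(filtered_lines)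
-- ===== SOURCE B (Python) =====
-- def remove_conftest_from_diff(text: str) -> str:
--     """
--     Remove all conftest.py related sections from the diff.
--     Section-wise: chunk the diff at 'diff --git' headers, then keep each
--     section's lines up to (excluding) its first conftest trigger line.
--     """
--     if not text:
--         return text
--
--     def is_trigger(line):
--         return 'conftest.py' in line and (
--             line.startswith('diff --git')
--             or line.startswith('---')
--             or line.startswith('+++'))
--
--     sections = []
--     cur = []
--     for line in text.split('\n'):
--         if line.startswith('diff --git'):
--             sections.append(cur)
--             cur = [line]
--         else:
--             cur.append(line)
--     sections.append(cur)
--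
--     kept = []
--     for sec in sections:
--         for line in sec:
--             if is_trigger(line):
--                 break
--             kept.append(line)
--     return '\n'.join(kept)
-- ===== Notes on version B (the rewrite author's own statement) =====
-- stated objective: alternative
-- what changed: Replaced A's single flat while-loop with a skip flag by a two-stage decomposition: chunk the diff into 'diff --git' sections, then take each section's lines up to its first conftest trigger line and concatenate.
import Mathlib
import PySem

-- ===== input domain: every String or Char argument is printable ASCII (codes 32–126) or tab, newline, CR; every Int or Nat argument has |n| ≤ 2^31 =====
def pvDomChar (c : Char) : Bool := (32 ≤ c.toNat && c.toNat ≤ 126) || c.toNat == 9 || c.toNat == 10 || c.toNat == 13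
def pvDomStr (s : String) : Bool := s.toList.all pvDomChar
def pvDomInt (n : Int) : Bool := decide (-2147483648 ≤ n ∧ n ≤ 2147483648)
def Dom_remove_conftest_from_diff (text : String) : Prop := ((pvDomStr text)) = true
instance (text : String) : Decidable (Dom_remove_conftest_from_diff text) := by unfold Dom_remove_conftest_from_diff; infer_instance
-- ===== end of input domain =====

-- B restructures A's flat skip-flag loop into a chunk-then-take-while decomposition
-- (split into 'diff --git' sections, cut each at its first conftest trigger line);
-- objective: alternative decomposition, same O(n) cost.

-- ===== PORT A =====
-- A's while-loop over lines with the skip_conftest_section flag, as structural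
-- recursion carrying the flag; appends become cons.
def removeLoopA : List String → Bool → List String
  | [], _ => []
  | l :: rest, skip =>
    if PySem.Str.startswith l "diff --git" && PySem.Str.isIn "conftest.py" l then
      removeLoopA rest true
    else if skip && !PySem.Str.startswith l "diff --git" then
      removeLoopA rest true
    else if PySem.Str.startswith l "---" && PySem.Str.isIn "conftest.py" l then
      removeLoopA rest true
    else if PySem.Str.startswith l "+++" && PySem.Str.isIn "conftest.py" l then
      removeLoopA rest true
    else
      l :: removeLoopA rest false

def remove_conftest_from_diff (text : String) : String :=
  if text == "" then text
  else PySem.Str.join "\n" (removeLoopA ((PySem.Str.split? text "\n").getD []) false)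

-- ===== PORT B =====
def pvTrigB (l : String) : Bool :=
  PySem.Str.isIn "conftest.py" l &&
    (PySem.Str.startswith l "diff --git" ||
     PySem.Str.startswith l "---" ||
     PySem.Str.startswith l "+++")

-- partition the lines into sections beginning at 'diff --git' headers (Source B's first loop)
def pvSections : List String → List String → List (List String)
  | [], cur => [cur]
  | l :: rest, cur =>
    if PySem.Str.startswith l "diff --git" then cur :: pvSections rest [l]
    else pvSections rest (cur ++ [l])

-- keep a section's lines up to its first trigger line (Source B's inner loop with break)
def pvKeepSec : List String → List String
  | [] => []
  | l :: rest => if pvTrigB l then [] else l :: pvKeepSec rest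

def remove_conftest_from_diff_alt (text : String) : String :=
  if text == "" then text
  else PySem.Str.join "\n" ((pvSections ((PySem.Str.split? text "\n").getD []) []).flatMap pvKeepSec)

-- ===== PRECONDITION & SPEC =====
def Spec_remove_conftest_from_diff (text : String) (out : String) : Prop := out = remove_conftest_from_diff_alt text
instance (text : String) (out : String) : Decidable (Spec_remove_conftest_from_diff text out) := by unfold Spec_remove_conftest_from_diff; infer_instance

-- ===== CLAIM (what is proved, stated in full; the proofs are below) =====
def Claim_equal_remove_conftest_from_diff : Prop := ∀ (text : String), Dom_remove_conftest_from_diff text → Spec_remove_conftest_from_diff text (remove_conftest_from_diff text)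

-- ===== LEMMAS AND PROOFS =====

-- A's loop in not-skipping state: a trigger line flips the flag, anything else is kept.
lemma loopA_false_cons (l : String) (rest : List String) :
    removeLoopA (l :: rest) false =
      if pvTrigB l then removeLoopA rest true else l :: removeLoopA rest false := by
  cases hC : PySem.Str.isIn "conftest.py" l <;>
    cases hH : PySem.Str.startswith l "diff --git" <;>
      cases hD : PySem.Str.startswith l "---" <;>
        cases hP : PySem.Str.startswith l "+++" <;>
          simp at hC hH hD hP <;>
            simp [removeLoopA, pvTrigB, hC, hH, hD, hP]

-- A's loop in skipping state: only a clean 'diff --git' header resumes output.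
lemma loopA_true_cons (l : String) (rest : List String) :
    removeLoopA (l :: rest) true =
      if PySem.Str.startswith l "diff --git" && !pvTrigB l then
        l :: removeLoopA rest false
      else removeLoopA rest true := by
  cases hC : PySem.Str.isIn "conftest.py" l <;>
    cases hH : PySem.Str.startswith l "diff --git" <;>
      cases hD : PySem.Str.startswith l "---" <;>
        cases hP : PySem.Str.startswith l "+++" <;>
          simp at hC hH hD hP <;>
            simp [removeLoopA, pvTrigB, hC, hH, hD, hP]

lemma keepSec_of_clean (xs : List String) (h : ∀ x ∈ xs, pvTrigB x = false) :
    pvKeepSec xs = xs := by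
  induction xs with
  | nil => rfl
  | cons x t ih =>
    simp [pvKeepSec, h x (by simp), ih (fun y hy => h y (by simp [hy]))]

lemma keepSec_append (xs ys : List String) :
    pvKeepSec (xs ++ ys) =
      if ∀ x ∈ xs, pvTrigB x = false then xs ++ pvKeepSec ys else pvKeepSec xs := by
  induction xs with
  | nil => simp
  | cons x t ih =>
    by_cases hx : pvTrigB x = true
    · simp [pvKeepSec, hx]
    · simp only [Bool.not_eq_true] at hx
      simp [pvKeepSec, hx, ih]
      split_ifs <;> simp

-- Main invariant: the kept lines of the sections built from a partial current
-- chunk 'cur' equal 'cur's kept lines followed by A's loop from the matching flag state.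
lemma sections_flatMap_eq (lines : List String) : ∀ cur : List String,
    (pvSections lines cur).flatMap pvKeepSec =
      if ∀ x ∈ cur, pvTrigB x = false then cur ++ removeLoopA lines false
      else pvKeepSec cur ++ removeLoopA lines true := by
  induction lines with
  | nil =>
    intro cur
    simp only [pvSections, List.flatMap_cons, List.flatMap_nil, List.append_nil, removeLoopA]
    split_ifs with h
    · simp [keepSec_of_clean cur h]
    · simp
  | cons l rest ih =>
    intro cur
    by_cases hH : PySem.Str.startswith l "diff --git" = true
    · have hH' := hH; simp at hH'
      simp only [pvSections, hH, if_true, List.flatMap_cons, ih [l]]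
      by_cases hT : pvTrigB l = true
      · simp [hT, loopA_false_cons, loopA_true_cons, hH', pvKeepSec]
        exact fun h => keepSec_of_clean cur h
      · simp only [Bool.not_eq_true] at hT
        simp [hT, loopA_false_cons, loopA_true_cons, hH']
        exact fun h => keepSec_of_clean cur h
    · have hH' := hH; simp at hH'
      simp only [pvSections]
      rw [if_neg hH, ih (cur ++ [l]), loopA_false_cons, loopA_true_cons]
      by_cases hcur : ∀ x ∈ cur, pvTrigB x = false
      · by_cases hT : pvTrigB l = true
        · have hfalse : ¬ ∀ x ∈ cur ++ [l], pvTrigB x = false := by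
            intro hall; have := hall l (by simp); simp [hT] at this
          rw [if_neg hfalse, keepSec_append, if_pos hcur]
          simp [pvKeepSec, hT, hH']
          intro x hx htr
          exact absurd (hcur x hx) (by simp [htr])
        · simp only [Bool.not_eq_true] at hT
          have htrue : ∀ x ∈ cur ++ [l], pvTrigB x = false := by
            intro x hx
            rcases List.mem_append.mp hx with h | h
            · exact hcur x h
            · simp at h; subst h; exact hT
          rw [if_pos htrue, if_pos hcur]
          simp [hT]
      · have hfalse : ¬ ∀ x ∈ cur ++ [l], pvTrigB x = false :=
          fun hall => hcur (fun x hx => hall x (List.mem_append.mpr (Or.inl hx)))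
        rw [if_neg hfalse, if_neg hcur, keepSec_append, if_neg hcur]
        simp [hH']

-- ===== VERDICT (by name: the statement is the Claim_ definition above) =====
theorem remove_conftest_from_diff_spec : Claim_equal_remove_conftest_from_diff := by
  intro text _
  unfold Spec_remove_conftest_from_diff remove_conftest_from_diff remove_conftest_from_diff_alt
  by_cases h : text == ""
  · simp [h]
  · simp only [h, Bool.false_eq_true, if_false]
    rw [sections_flatMap_eq]
    simp
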